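-- pv_equiv track=rewrite | github.com/ddasic0/gpadefenders | gpa_defenders/src/ui/screens.py | _map_stats
-- ===== SOURCE A (Python) =====
-- def _map_stats(waypoint_cells: list[tuple[int, int]]) -> tuple[int, int]:
--     path_tiles = 0
--     turns = 0
--     prev_dir: tuple[int, int] | None = None
--
--     for i in range(len(waypoint_cells) - 1):
--         gx1, gy1 = waypoint_cells[i]
--         gx2, gy2 = waypoint_cells[i + 1]
--         dx = gx2 - gx1
--         dy = gy2 - gy1
--         path_tiles += abs(dx) + abs(dy)
--
--         cur_dir = (
--             0 if dx == 0 else int(dx / abs(dx)),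
--             0 if dy == 0 else int(dy / abs(dy)),
--         )
--         if prev_dir is not None and cur_dir != prev_dir:
--             turns += 1
--         prev_dir = cur_dir
--
--     return path_tiles, turns
-- ===== SOURCE B (Python) =====
-- def _map_stats(waypoint_cells: list[tuple[int, int]]) -> tuple[int, int]:
--     # Run-compression algorithm: split the segment sequence into maximal runs of
--     # equally-directed segments; each run contributes the Manhattan distance
--     # between its two endpoints (no per-segment summing), and the number of
--     # turns is simply the number of runs minus one.
--     def sgn(v: int) -> int:
--         return (v > 0) - (v < 0)
--
--     n = len(waypoint_cells)
--     path_tiles = 0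
--     runs = 0
--     i = 0
--     while i < n - 1:
--         x1, y1 = waypoint_cells[i]
--         x2, y2 = waypoint_cells[i + 1]
--         d = (sgn(x2 - x1), sgn(y2 - y1))
--         j = i + 1
--         while j < n - 1:
--             a1, b1 = waypoint_cells[j]
--             a2, b2 = waypoint_cells[j + 1]
--             if (sgn(a2 - a1), sgn(b2 - b1)) != d:
--                 break
--             j += 1
--         sx, sy = waypoint_cells[i]
--         ex, ey = waypoint_cells[j]
--         path_tiles += abs(ex - sx) + abs(ey - sy)
--         runs += 1
--         i = j
--     return path_tiles, (runs - 1 if runs else 0)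
-- ===== Notes on version B (the rewrite author's own statement) =====
-- stated objective: alternative
-- what changed: B uses run-compression: it splits the segment sequence into maximal runs of equally-directed segments with a nested while loop, adds the Manhattan distance between each run's two endpoints (no per-segment tile summing), and derives turns as the number of runs minus one, replacing A's fused per-segment loop with prev_dir state.
import Mathlib
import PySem

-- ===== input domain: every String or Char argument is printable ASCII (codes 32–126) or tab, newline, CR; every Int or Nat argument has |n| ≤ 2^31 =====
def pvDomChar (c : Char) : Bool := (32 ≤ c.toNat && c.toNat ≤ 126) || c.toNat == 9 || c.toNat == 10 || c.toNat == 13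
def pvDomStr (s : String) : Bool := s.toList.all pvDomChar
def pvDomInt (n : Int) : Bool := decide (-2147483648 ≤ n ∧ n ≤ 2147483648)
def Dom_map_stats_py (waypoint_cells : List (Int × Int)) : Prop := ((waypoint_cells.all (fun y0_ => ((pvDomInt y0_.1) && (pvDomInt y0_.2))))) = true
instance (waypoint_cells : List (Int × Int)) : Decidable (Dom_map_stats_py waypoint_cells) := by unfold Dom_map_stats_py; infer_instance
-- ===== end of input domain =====

-- B replaces A's fused per-segment loop (prev_dir/turns state) by run-compression:
-- maximal runs of equally-directed segments, Manhattan distance between run endpoints,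
-- turns = runs - 1; same return values, same cost.
-- (Loops are ported with a fuel counter ≥ the number of remaining iterations; the
-- loop guards themselves are the Python ones, fuel only makes the recursion structural.)

-- ===== PORT A =====
-- 0 if v == 0 else int(v / abs(v)): for nonzero int v, v/abs(v) is exactly ±1.0, int() gives ±1
def pvSignA (v : Int) : Int := if v = 0 then 0 else if v < 0 then -1 else 1

-- the 'for i in range(len-1)' loop; indices i, i+1 are always in range there,
-- so the getD default is never read
def pvLoopA (xs : List (Int × Int)) (n : Nat) :
    Nat → Nat → Int → Int → Option (Int × Int) → Int × Int
  | 0, _, path, turns, _ => (path, turns)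
  | fuel + 1, i, path, turns, prev =>
    if i < n - 1 then
      let p := xs.getD i (0, 0)
      let q := xs.getD (i + 1) (0, 0)
      let dx := q.1 - p.1
      let dy := q.2 - p.2
      let cur : Int × Int := (pvSignA dx, pvSignA dy)
      let turns' := match prev with
        | some pd => if cur ≠ pd then turns + 1 else turns
        | none => turns
      pvLoopA xs n fuel (i + 1) (path + (|dx| + |dy|)) turns' (some cur)
    else (path, turns)

def map_stats_py (waypoint_cells : List (Int × Int)) : Int × Int :=
  pvLoopA waypoint_cells waypoint_cells.length waypoint_cells.length 0 0 0 none

-- ===== PORT B =====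
-- sgn(v) = (v > 0) - (v < 0)
def pvSgnB (v : Int) : Int := (if v > 0 then 1 else 0) - (if v < 0 then 1 else 0)

-- (sgn(a2-a1), sgn(b2-b1)) for waypoint_cells[k], waypoint_cells[k+1]
def pvDirB (xs : List (Int × Int)) (k : Nat) : Int × Int :=
  let p := xs.getD k (0, 0)
  let q := xs.getD (k + 1) (0, 0)
  (pvSgnB (q.1 - p.1), pvSgnB (q.2 - p.2))

-- inner 'while j < n - 1: … break' loop: advance j over the run of direction d
def pvRunEnd (xs : List (Int × Int)) (n : Nat) (d : Int × Int) : Nat → Nat → Nat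
  | 0, j => j
  | fuel + 1, j =>
    if j < n - 1 then
      if pvDirB xs j = d then pvRunEnd xs n d fuel (j + 1) else j
    else j

-- outer 'while i < n - 1' loop of Source B
def pvOuterB (xs : List (Int × Int)) (n : Nat) : Nat → Nat → Int → Int → Int × Int
  | 0, _, tiles, runs => (tiles, if runs = 0 then 0 else runs - 1)
  | fuel + 1, i, tiles, runs =>
    if i < n - 1 then
      let d := pvDirB xs i
      let j := pvRunEnd xs n d n (i + 1)
      let s := xs.getD i (0, 0)
      let e := xs.getD j (0, 0)
      pvOuterB xs n fuel j (tiles + (|e.1 - s.1| + |e.2 - s.2|)) (runs + 1)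
    else (tiles, if runs = 0 then 0 else runs - 1)

def map_stats_py_alt (waypoint_cells : List (Int × Int)) : Int × Int :=
  pvOuterB waypoint_cells waypoint_cells.length waypoint_cells.length 0 0 0

-- ===== PRECONDITION & SPEC =====
def Spec_map_stats_py (waypoint_cells : List (Int × Int)) (out : Int × Int) : Prop := out = map_stats_py_alt waypoint_cells
instance (waypoint_cells : List (Int × Int)) (out : Int × Int) : Decidable (Spec_map_stats_py waypoint_cells out) := by unfold Spec_map_stats_py; infer_instance

-- ===== CLAIM (what is proved, stated in full; the proofs are below) =====
def Claim_equal_map_stats_py : Prop := ∀ (waypoint_cells : List (Int × Int)), Dom_map_stats_py waypoint_cells → Spec_map_stats_py waypoint_cells (map_stats_py waypoint_cells)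

-- ===== LEMMAS AND PROOFS =====

-- reference functions used only by the proofs: dirAt (direction of segment k),
-- stepAt (tiles of segment k), Ssuf i (tiles from segment i on), Tsuf i (turns
-- among segments ≥ i)
def dirAt (xs : List (Int × Int)) (k : Nat) : Int × Int :=
  (pvSignA ((xs.getD (k + 1) (0, 0)).1 - (xs.getD k (0, 0)).1),
   pvSignA ((xs.getD (k + 1) (0, 0)).2 - (xs.getD k (0, 0)).2))

def stepAt (xs : List (Int × Int)) (k : Nat) : Int :=
  |(xs.getD (k + 1) (0, 0)).1 - (xs.getD k (0, 0)).1| +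
  |(xs.getD (k + 1) (0, 0)).2 - (xs.getD k (0, 0)).2|

def Ssuf (xs : List (Int × Int)) (n i : Nat) : Int :=
  if _h : i < n - 1 then stepAt xs i + Ssuf xs n (i + 1) else 0
termination_by n - 1 - i

def Tsuf (xs : List (Int × Int)) (n i : Nat) : Int :=
  if _h : i + 1 < n - 1 then
    (if dirAt xs (i + 1) ≠ dirAt xs i then 1 else 0) + Tsuf xs n (i + 1)
  else 0
termination_by n - 1 - i

theorem Ssuf_pos (xs : List (Int × Int)) (n i : Nat) (h : i < n - 1) :
    Ssuf xs n i = stepAt xs i + Ssuf xs n (i + 1) := by rw [Ssuf, dif_pos h]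

theorem Ssuf_neg (xs : List (Int × Int)) (n i : Nat) (h : ¬ i < n - 1) :
    Ssuf xs n i = 0 := by rw [Ssuf, dif_neg h]

theorem Tsuf_pos (xs : List (Int × Int)) (n i : Nat) (h : i + 1 < n - 1) :
    Tsuf xs n i = (if dirAt xs (i + 1) ≠ dirAt xs i then 1 else 0) + Tsuf xs n (i + 1) := by
  rw [Tsuf, dif_pos h]

theorem Tsuf_neg (xs : List (Int × Int)) (n i : Nat) (h : ¬ i + 1 < n - 1) :
    Tsuf xs n i = 0 := by rw [Tsuf, dif_neg h]

theorem dirAt_eq (xs : List (Int × Int)) (k : Nat) :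
    (pvSignA ((xs.getD (k + 1) (0, 0)).1 - (xs.getD k (0, 0)).1),
     pvSignA ((xs.getD (k + 1) (0, 0)).2 - (xs.getD k (0, 0)).2)) = dirAt xs k := rfl

theorem stepAt_eq (xs : List (Int × Int)) (k : Nat) :
    |(xs.getD (k + 1) (0, 0)).1 - (xs.getD k (0, 0)).1| +
    |(xs.getD (k + 1) (0, 0)).2 - (xs.getD k (0, 0)).2| = stepAt xs k := rfl

theorem sgnB_eq_signA (v : Int) : pvSgnB v = pvSignA v := by
  unfold pvSignA pvSgnB; split_ifs <;> omega

theorem dirB_eq_dirAt (xs : List (Int × Int)) (k : Nat) : pvDirB xs k = dirAt xs k := by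
  simp [pvDirB, dirAt, sgnB_eq_signA]

-- ---- A side: the fused loop computes (Ssuf, Tsuf) ----

theorem loopA_exit (xs : List (Int × Int)) (n : Nat) (fuel i : Nat) (path turns : Int)
    (prev : Option (Int × Int)) (h : ¬ i < n - 1) :
    pvLoopA xs n fuel i path turns prev = (path, turns) := by
  cases fuel with
  | zero => rfl
  | succ fuel => rw [pvLoopA, if_neg h]

theorem outerB_exit (xs : List (Int × Int)) (n : Nat) (fuel i : Nat) (tiles runs : Int)
    (h : ¬ i < n - 1) :
    pvOuterB xs n fuel i tiles runs = (tiles, if runs = 0 then 0 else runs - 1) := by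
  cases fuel with
  | zero => rfl
  | succ fuel => rw [pvOuterB, if_neg h]

theorem loopA_some (xs : List (Int × Int)) (n : Nat) :
    ∀ fuel i, n - 1 - i ≤ fuel → i < n - 1 → ∀ (path turns : Int) (pd : Int × Int),
      pvLoopA xs n fuel i path turns (some pd) =
        (path + Ssuf xs n i,
         turns + (if dirAt xs i ≠ pd then 1 else 0) + Tsuf xs n i) := by
  intro fuel
  induction fuel with
  | zero => intro i hf hi; omega
  | succ fuel IH =>
    intro i hf hi path turns pd
    rw [pvLoopA]
    simp only [if_pos hi, dirAt_eq, stepAt_eq]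
    by_cases h2 : i + 1 < n - 1
    · rw [IH (i + 1) (by omega) h2]
      rw [Ssuf_pos xs n i hi, Tsuf_pos xs n i h2]
      simp only [Prod.mk.injEq]
      constructor
      · ring
      · split_ifs <;> ring
    · rw [loopA_exit xs n fuel (i + 1) _ _ _ (by omega)]
      rw [Ssuf_pos xs n i hi, Ssuf_neg xs n (i + 1) (by omega), Tsuf_neg xs n i h2]
      simp only [Prod.mk.injEq]
      constructor
      · ring
      · split_ifs <;> ring

theorem loopA_eq (xs : List (Int × Int)) (n fuel i : Nat) (hf : n - 1 - i ≤ fuel)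
    (hi : i < n - 1) (path turns : Int) :
    pvLoopA xs n fuel i path turns none = (path + Ssuf xs n i, turns + Tsuf xs n i) := by
  cases fuel with
  | zero => omega
  | succ fuel =>
    rw [pvLoopA]
    simp only [if_pos hi, dirAt_eq, stepAt_eq]
    by_cases h2 : i + 1 < n - 1
    · rw [loopA_some xs n fuel (i + 1) (by omega) h2]
      rw [Ssuf_pos xs n i hi, Tsuf_pos xs n i h2]
      simp only [Prod.mk.injEq]
      constructor
      · ring
      · split_ifs <;> ring
    · rw [loopA_exit xs n fuel (i + 1) _ _ _ (by omega)]
      rw [Ssuf_pos xs n i hi, Ssuf_neg xs n (i + 1) (by omega), Tsuf_neg xs n i h2]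
      simp only [Prod.mk.injEq]
      exact ⟨by ring, by ring⟩

-- ---- B side: the run loop computes the same pair ----

theorem runEnd_ge (xs : List (Int × Int)) (n : Nat) (d : Int × Int) :
    ∀ fuel j, j ≤ pvRunEnd xs n d fuel j := by
  intro fuel
  induction fuel with
  | zero => intro j; rw [pvRunEnd]
  | succ fuel IH =>
    intro j
    rw [pvRunEnd]
    split
    · split
      · exact le_trans (by omega) (IH (j + 1))
      · exact le_refl _
    · exact le_refl _

theorem runEnd_le (xs : List (Int × Int)) (n : Nat) (d : Int × Int) :
    ∀ fuel j, j ≤ n - 1 → pvRunEnd xs n d fuel j ≤ n - 1 := by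
  intro fuel
  induction fuel with
  | zero => intro j hj; rw [pvRunEnd]; exact hj
  | succ fuel IH =>
    intro j hj
    rw [pvRunEnd]
    split
    · split
      · exact IH (j + 1) (by omega)
      · exact hj
    · exact hj

theorem runEnd_run (xs : List (Int × Int)) (n : Nat) (d : Int × Int) :
    ∀ fuel j k, j ≤ k → k < pvRunEnd xs n d fuel j → dirAt xs k = d := by
  intro fuel
  induction fuel with
  | zero => intro j k hjk hk; rw [pvRunEnd] at hk; omega
  | succ fuel IH =>
    intro j k hjk hk
    rw [pvRunEnd] at hk
    by_cases h1 : j < n - 1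
    · rw [if_pos h1] at hk
      by_cases h2 : pvDirB xs j = d
      · rw [if_pos h2] at hk
        by_cases hkj : k = j
        · subst hkj; rw [← dirB_eq_dirAt]; exact h2
        · exact IH (j + 1) k (by omega) hk
      · rw [if_neg h2] at hk; omega
    · rw [if_neg h1] at hk; omega

theorem runEnd_stop (xs : List (Int × Int)) (n : Nat) (d : Int × Int) :
    ∀ fuel j, n - 1 - j ≤ fuel → pvRunEnd xs n d fuel j < n - 1 →
      dirAt xs (pvRunEnd xs n d fuel j) ≠ d := by
  intro fuel
  induction fuel with
  | zero => intro j hf hlt; rw [pvRunEnd] at hlt; omega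
  | succ fuel IH =>
    intro j hf hlt
    rw [pvRunEnd] at hlt ⊢
    by_cases h1 : j < n - 1
    · rw [if_pos h1] at hlt ⊢
      by_cases h2 : pvDirB xs j = d
      · rw [if_pos h2] at hlt ⊢
        exact IH (j + 1) (by omega) hlt
      · rw [if_neg h2] at hlt ⊢
        rw [dirB_eq_dirAt] at h2; exact h2
    · rw [if_neg h1] at hlt; omega

-- triangle equality for same-signed displacements
theorem pvTri (d a b : Int) (hd : d = 0 ∨ d = 1 ∨ d = -1)
    (h1 : d * a = |a|) (h2 : d * b = |b|) :
    d * (a + b) = |a + b| ∧ |a + b| = |a| + |b| := by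
  rcases abs_cases a with ⟨e1, f1⟩ | ⟨e1, f1⟩ <;>
    rcases abs_cases b with ⟨e2, f2⟩ | ⟨e2, f2⟩ <;>
    rcases abs_cases (a + b) with ⟨e3, f3⟩ | ⟨e3, f3⟩ <;>
    rw [e1] at h1 <;> rw [e2] at h2 <;> rw [e1, e2, e3] <;>
    rcases hd with h | h | h <;> subst h <;> constructor <;> omega

-- on a run [i, j) of direction d, the endpoint displacement has sign d and the
-- endpoint Manhattan distance equals the per-segment tile sum
theorem run_absorb (xs : List (Int × Int)) (n : Nat) (d : Int × Int) :
    ∀ m i j, j - i = m → i ≤ j → j ≤ n - 1 →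
      (∀ k, i ≤ k → k < j → dirAt xs k = d) →
      (d.1 * ((xs.getD j (0,0)).1 - (xs.getD i (0,0)).1) = |(xs.getD j (0,0)).1 - (xs.getD i (0,0)).1|) ∧
      (d.2 * ((xs.getD j (0,0)).2 - (xs.getD i (0,0)).2) = |(xs.getD j (0,0)).2 - (xs.getD i (0,0)).2|) ∧
      (|(xs.getD j (0,0)).1 - (xs.getD i (0,0)).1| + |(xs.getD j (0,0)).2 - (xs.getD i (0,0)).2|
        + Ssuf xs n j = Ssuf xs n i) := by
  intro m
  induction m using Nat.strong_induction_on with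
  | _ m IH =>
    intro i j hm hij hjn hrun
    by_cases hlt : i < j
    · have hd : dirAt xs i = d := hrun i (le_refl _) hlt
      have hin : i < n - 1 := by omega
      obtain ⟨hx, hy, hs⟩ := IH (j - (i + 1)) (by omega) (i + 1) j rfl (by omega) hjn
        (fun k hk1 hk2 => hrun k (by omega) hk2)
      set p := xs.getD i ((0 : Int), (0 : Int)) with hp
      set q := xs.getD (i + 1) ((0 : Int), (0 : Int)) with hq
      set r := xs.getD j ((0 : Int), (0 : Int)) with hr
      have hd1 : d.1 = pvSignA (q.1 - p.1) := by rw [← hd]; rfl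
      have hd2 : d.2 = pvSignA (q.2 - p.2) := by rw [← hd]; rfl
      have hx1 : d.1 * (q.1 - p.1) = |q.1 - p.1| := by
        rw [hd1]; unfold pvSignA; split_ifs with h1 h2
        · simp [h1]
        · rw [abs_of_neg h2]; ring
        · rw [abs_of_nonneg (by omega)]; ring
      have hy1 : d.2 * (q.2 - p.2) = |q.2 - p.2| := by
        rw [hd2]; unfold pvSignA; split_ifs with h1 h2
        · simp [h1]
        · rw [abs_of_neg h2]; ring
        · rw [abs_of_nonneg (by omega)]; ring
      have hd1b : d.1 = 0 ∨ d.1 = 1 ∨ d.1 = -1 := by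
        rw [hd1]; unfold pvSignA; split_ifs <;> simp
      have hd2b : d.2 = 0 ∨ d.2 = 1 ∨ d.2 = -1 := by
        rw [hd2]; unfold pvSignA; split_ifs <;> simp
      have ex : r.1 - p.1 = (q.1 - p.1) + (r.1 - q.1) := by ring
      have ey : r.2 - p.2 = (q.2 - p.2) + (r.2 - q.2) := by ring
      have hX := pvTri d.1 (q.1 - p.1) (r.1 - q.1) hd1b hx1 hx
      have hY := pvTri d.2 (q.2 - p.2) (r.2 - q.2) hd2b hy1 hy
      rw [ex, ey]
      refine ⟨hX.1, hY.1, ?_⟩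
      rw [Ssuf_pos xs n i hin]
      have hst : stepAt xs i = |q.1 - p.1| + |q.2 - p.2| := rfl
      rw [hst, hX.2, hY.2]
      linarith [hs]
    · have : i = j := by omega
      subst this
      refine ⟨by simp, by simp, by simp⟩

theorem Tsuf_zero_on_run (xs : List (Int × Int)) (n : Nat) (d : Int × Int) :
    ∀ m i, n - 1 - i = m → (∀ k, i ≤ k → k < n - 1 → dirAt xs k = d) →
      Tsuf xs n i = 0 := by
  intro m
  induction m using Nat.strong_induction_on with
  | _ m IH =>
    intro i hm hrun
    by_cases h1 : i + 1 < n - 1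
    · rw [Tsuf_pos xs n i h1]
      have e1 : dirAt xs (i + 1) = d := hrun (i + 1) (by omega) h1
      have e2 : dirAt xs i = d := hrun i (le_refl _) (by omega)
      rw [IH (n - 1 - (i + 1)) (by omega) (i + 1) rfl (fun k hk1 hk2 => hrun k (by omega) hk2)]
      rw [e1, e2]; simp
    · exact Tsuf_neg xs n i h1

theorem Tsuf_run_step (xs : List (Int × Int)) (n : Nat) (d : Int × Int) :
    ∀ m i j, j - i = m → i < j → j < n - 1 →
      (∀ k, i ≤ k → k < j → dirAt xs k = d) → dirAt xs j ≠ d →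
      Tsuf xs n i = 1 + Tsuf xs n j := by
  intro m
  induction m using Nat.strong_induction_on with
  | _ m IH =>
    intro i j hm hij hjn hrun hstop
    rw [Tsuf_pos xs n i (by omega)]
    by_cases hj : i + 1 = j
    · subst hj
      have e2 : dirAt xs i = d := hrun i (le_refl _) (by omega)
      rw [e2, if_pos (by simpa [e2] using hstop)]
    · have e1 : dirAt xs (i + 1) = d := hrun (i + 1) (by omega) (by omega)
      have e2 : dirAt xs i = d := hrun i (le_refl _) (by omega)
      rw [IH (j - (i + 1)) (by omega) (i + 1) j rfl (by omega) hjn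
        (fun k hk1 hk2 => hrun k (by omega) hk2) hstop]
      rw [e1, e2]; simp

theorem outerB_eq (xs : List (Int × Int)) (n : Nat) :
    ∀ fuel i, n - 1 - i ≤ fuel → i < n - 1 → ∀ (tiles runs : Int), 0 ≤ runs →
      pvOuterB xs n fuel i tiles runs = (tiles + Ssuf xs n i, runs + Tsuf xs n i) := by
  intro fuel
  induction fuel with
  | zero => intro i hf hi; omega
  | succ fuel IH =>
    intro i hf hi tiles runs hruns
    rw [pvOuterB]
    simp only [if_pos hi]
    set d := pvDirB xs i with hd
    set j := pvRunEnd xs n d n (i + 1) with hj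
    have hge : i + 1 ≤ j := runEnd_ge xs n d n (i + 1)
    have hle : j ≤ n - 1 := runEnd_le xs n d n (i + 1) (by omega)
    have hrun : ∀ k, i ≤ k → k < j → dirAt xs k = d := by
      intro k hk1 hk2
      by_cases hk : k = i
      · subst hk; rw [← dirB_eq_dirAt]
      · exact runEnd_run xs n d n (i + 1) k (by omega) hk2
    obtain ⟨_, _, hs⟩ := run_absorb xs n d (j - i) i j rfl (by omega) hle hrun
    by_cases hjn : j < n - 1
    · have hstop : dirAt xs j ≠ d :=
        runEnd_stop xs n d n (i + 1) (by omega) hjn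
      rw [IH j (by omega) hjn (tiles + _) (runs + 1) (by omega)]
      rw [Tsuf_run_step xs n d (j - i) i j rfl (by omega) hjn hrun hstop]
      simp only [Prod.mk.injEq]
      constructor
      · linarith [hs]
      · ring
    · have hjeq : j = n - 1 := by omega
      have hTz : Tsuf xs n i = 0 := Tsuf_zero_on_run xs n d (n - 1 - i) i rfl
        (fun k hk1 hk2 => hrun k hk1 (by omega))
      rw [Ssuf_neg xs n j (by omega)] at hs
      rw [outerB_exit xs n fuel j _ _ (by omega), hTz]
      simp only [Prod.mk.injEq]
      constructor
      · linarith [hs]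
      · rw [if_neg (show ¬ (runs + 1 = 0) by omega)]; ring

-- ===== VERDICT (by name: the statement is the Claim_ definition above) =====
theorem map_stats_py_spec : Claim_equal_map_stats_py := by
  intro xs _
  unfold Spec_map_stats_py map_stats_py map_stats_py_alt
  by_cases h : 0 < xs.length - 1
  · rw [loopA_eq xs xs.length xs.length 0 (by omega) h,
      outerB_eq xs xs.length xs.length 0 (by omega) h 0 0 le_rfl]
  · rw [loopA_exit xs xs.length xs.length 0 0 0 none h,
      outerB_exit xs xs.length xs.length 0 0 0 h]
    norm_num
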